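-- pv_equiv track=rewrite | github.com/fredpottier/KBGPT | app/benchmark/questions/generate_human_questions.py | _group_docs_by_theme
-- ===== SOURCE A (Python) =====
-- from typing import Any, Dict, List, Tuple
--
-- def _group_docs_by_theme(docs: List[Dict]) -> Dict[str, List[Dict]]:
--     """Groupe les documents par theme (operations, security, conversion, etc.)."""
--     groups: Dict[str, List[Dict]] = {}
--     for doc in docs:
--         doc_id = doc["doc_id"].lower()
--         if "security" in doc_id:
--             theme = "security"
--         elif "conversion" in doc_id:
--             theme = "conversion"
--         elif "upgrade" in doc_id:
--             theme = "upgrade"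
--         elif "operation" in doc_id:
--             theme = "operations"
--         elif "installation" in doc_id:
--             theme = "installation"
--         elif "scope" in doc_id or "feature" in doc_id:
--             theme = "feature_scope"
--         elif "business" in doc_id:
--             theme = "business_scope"
--         else:
--             theme = "other"
--         groups.setdefault(theme, []).append(doc)
--     return groups
-- ===== SOURCE B (Python) =====
-- from typing import Any, Dict, List, Tuple
--
-- _KEYWORDS: List[Tuple[str, str]] = [
--     ("security", "security"),
--     ("conversion", "conversion"),
--     ("upgrade", "upgrade"),
--     ("operation", "operations"),
--     ("installation", "installation"),
--     ("scope", "feature_scope"),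
--     ("feature", "feature_scope"),
--     ("business", "business_scope"),
-- ]
--
-- def _theme_of(doc_id: str) -> str:
--     hits = [i for i, (kw, _t) in enumerate(_KEYWORDS) if kw in doc_id]
--     return "other" if not hits else _KEYWORDS[min(hits)][1]
--
-- def _group_docs_by_theme(docs: List[Dict]) -> Dict[str, List[Dict]]:
--     # staged passes: classify all docs, dedup themes in first-appearance order,
--     # then build each group with one filter pass per theme
--     themes = [_theme_of(d["doc_id"].lower()) for d in docs]
--     order = list(dict.fromkeys(themes))
--     return {t: [d for d, th in zip(docs, themes) if th == t] for t in order}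
-- ===== Notes on version B (the rewrite author's own statement) =====
-- stated objective: alternative
-- what changed: Replaces A's single accumulating setdefault/append pass with staged passes: classify every doc (theme chosen as the minimum-priority matching keyword from a table, not an if/elif chain), dedup the theme list in first-appearance order via dict.fromkeys, then build each group by a per-theme filter over the doc/theme pairs.
import Mathlib
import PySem

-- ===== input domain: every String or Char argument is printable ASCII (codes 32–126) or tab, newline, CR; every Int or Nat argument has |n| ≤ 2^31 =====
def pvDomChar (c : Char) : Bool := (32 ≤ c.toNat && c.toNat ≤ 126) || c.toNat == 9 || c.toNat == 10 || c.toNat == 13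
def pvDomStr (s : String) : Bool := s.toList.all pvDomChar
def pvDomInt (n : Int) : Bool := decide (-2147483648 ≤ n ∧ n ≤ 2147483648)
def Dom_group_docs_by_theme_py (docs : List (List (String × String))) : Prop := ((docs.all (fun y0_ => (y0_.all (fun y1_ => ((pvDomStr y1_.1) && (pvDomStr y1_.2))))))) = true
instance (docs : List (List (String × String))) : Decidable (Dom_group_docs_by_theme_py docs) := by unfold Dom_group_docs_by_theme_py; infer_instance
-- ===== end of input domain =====

-- B replaces A's single accumulating setdefault/append pass by staged passes: classify every doc
-- (min-priority matching keyword from a table), dedup the themes in first-appearance order, then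
-- build each group by a per-theme filter (alternative decomposition, same result).

-- ===== PORT A =====
-- literal transliteration of A's if/elif chain; groups.setdefault(theme, []).append(doc) is the
-- grouping modify "groups[theme] = groups.get(theme, []) + [doc]" (new key appended at the end)
def group_docs_by_theme_py (docs : List (List (String × String))) : List (String × List (List (String × String))) :=
  (docs.foldl (fun (groups : PySem.Dict String (List (List (String × String)))) doc =>
      let doc_id := PySem.Str.lower ((PySem.Dict.mk doc).getD "doc_id" "")
      let theme :=
        if PySem.Str.isIn "security" doc_id then "security"
        else if PySem.Str.isIn "conversion" doc_id then "conversion"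
        else if PySem.Str.isIn "upgrade" doc_id then "upgrade"
        else if PySem.Str.isIn "operation" doc_id then "operations"
        else if PySem.Str.isIn "installation" doc_id then "installation"
        else if PySem.Str.isIn "scope" doc_id || PySem.Str.isIn "feature" doc_id then "feature_scope"
        else if PySem.Str.isIn "business" doc_id then "business_scope"
        else "other"
      groups.modify theme [] (fun x => x ++ [doc]))
    PySem.Dict.empty).items

-- ===== PORT B =====
def pvKeywords : List (String × String) :=
  [("security", "security"), ("conversion", "conversion"), ("upgrade", "upgrade"),
   ("operation", "operations"), ("installation", "installation"),
   ("scope", "feature_scope"), ("feature", "feature_scope"), ("business", "business_scope")]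

-- hits = [i for i, (kw, _t) in enumerate(_KEYWORDS) if kw in doc_id]; "other" if not hits else _KEYWORDS[min(hits)][1]
def pvThemeOf (doc_id : String) : String :=
  let hits := ((PySem.List.enumerate pvKeywords).filter
    (fun p => PySem.Str.isIn p.2.1 doc_id)).map (fun p => p.1)
  match PySem.List.min? hits id with
  | none => "other"
  | some m => (PySem.List.pyGetD pvKeywords m ("", "")).2

def group_docs_by_theme_py_alt (docs : List (List (String × String))) : List (String × List (List (String × String))) :=
  let themes := docs.map (fun d => pvThemeOf (PySem.Str.lower ((PySem.Dict.mk d).getD "doc_id" "")))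
  let order := PySem.List.dedup themes
  order.map (fun t => (t, ((docs.zip themes).filter (fun p => p.2 == t)).map (fun p => p.1)))

-- ===== PRECONDITION & SPEC =====
-- Pre_ excludes docs missing the "doc_id" key, on which A raises KeyError (B raises there too).
def Pre_group_docs_by_theme_py (docs : List (List (String × String))) : Prop :=
  ∀ doc ∈ docs, doc.any (fun kv => kv.1 == "doc_id") = true
instance (docs : List (List (String × String))) : Decidable (Pre_group_docs_by_theme_py docs) := by
  unfold Pre_group_docs_by_theme_py; infer_instance

def pvWitness_group_docs_by_theme_py : (List (List (String × String))) :=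
  [[("doc_id", "SEC-Security-Guide"), ("title", "t")], [("doc_id", "misc")]]

def Spec_group_docs_by_theme_py (docs : List (List (String × String))) (out : List (String × List (List (String × String)))) : Prop := out = group_docs_by_theme_py_alt docs
instance (docs : List (List (String × String))) (out : List (String × List (List (String × String)))) : Decidable (Spec_group_docs_by_theme_py docs out) := by unfold Spec_group_docs_by_theme_py; infer_instance

-- ===== CLAIM (what is proved, stated in full; the proofs are below) =====
def Claim_equal_group_docs_by_theme_py : Prop := ∀ (docs : List (List (String × String))), Dom_group_docs_by_theme_py docs → Pre_group_docs_by_theme_py docs → Spec_group_docs_by_theme_py docs (group_docs_by_theme_py docs)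

-- ===== LEMMAS AND PROOFS =====

-- the key function both programs classify a doc with
def pvKeyOf (d : List (String × String)) : String :=
  pvThemeOf (PySem.Str.lower ((PySem.Dict.mk d).getD "doc_id" ""))

theorem pvMin?_cons_of_le (a : Int) (rest : List Int) (h : ∀ x ∈ rest, a ≤ x) :
    PySem.List.min? (a :: rest) id = some a := by
  show List.foldl _ (some a) rest = some a
  induction rest with
  | nil => rfl
  | cons x xs ih =>
    have hx : ¬ (x < a) := not_lt.mpr (h x (by simp))
    simp only [List.foldl_cons, id, if_neg hx]
    exact ih (fun y hy => h y (by simp [hy]))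

theorem pvIdx_ge (L : List (String × String)) (s : Int) :
    ∀ p ∈ PySem.List.enumerate L s, s ≤ p.1 := by
  intro p hp
  have h1 : p.1 ∈ (PySem.List.enumerate L s).map (fun q => q.1) := List.mem_map_of_mem hp
  rw [PySem.List.map_fst_enumerate] at h1
  exact ((PySem.List.mem_pyRange_one).1 h1).1

theorem pvMinHits (q : Int × String × String → Bool) :
    ∀ (L : List (String × String)) (s : Int),
      PySem.List.min? (((PySem.List.enumerate L s).filter q).map (fun p => p.1)) id
        = ((PySem.List.enumerate L s).find? q).map (fun p => p.1)
  | [], s => rfl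
  | p :: L, s => by
    rw [PySem.List.enumerate_cons]
    by_cases hq : q (s, p)
    · rw [List.filter_cons_of_pos hq, List.find?_cons_of_pos hq]
      simp only [List.map_cons]
      apply pvMin?_cons_of_le
      intro x hx
      obtain ⟨r, hr, hrx⟩ := List.mem_map.1 hx
      have := pvIdx_ge L (s + 1) r (List.mem_of_mem_filter hr)
      omega
    · rw [List.filter_cons_of_neg hq, List.find?_cons_of_neg hq]
      exact pvMinHits q L (s + 1)

theorem pvTheme_eq (did : String) :
    pvThemeOf did =
      (if PySem.Str.isIn "security" did then "security"
       else if PySem.Str.isIn "conversion" did then "conversion"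
       else if PySem.Str.isIn "upgrade" did then "upgrade"
       else if PySem.Str.isIn "operation" did then "operations"
       else if PySem.Str.isIn "installation" did then "installation"
       else if PySem.Str.isIn "scope" did || PySem.Str.isIn "feature" did then "feature_scope"
       else if PySem.Str.isIn "business" did then "business_scope"
       else "other") := by
  simp only [pvThemeOf]
  rw [pvMinHits]
  simp only [pvKeywords, PySem.List.enumerate_cons, PySem.List.enumerate_nil]
  by_cases h1 : PySem.Str.isIn "security" did
  · rw [List.find?_cons_of_pos (p := fun q : Int × String × String => PySem.Str.isIn q.2.1 did) (by exact h1), if_pos h1]; rfl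
  rw [List.find?_cons_of_neg (p := fun q : Int × String × String => PySem.Str.isIn q.2.1 did) (by exact h1), if_neg h1]
  by_cases h2 : PySem.Str.isIn "conversion" did
  · rw [List.find?_cons_of_pos (p := fun q : Int × String × String => PySem.Str.isIn q.2.1 did) (by exact h2), if_pos h2]; rfl
  rw [List.find?_cons_of_neg (p := fun q : Int × String × String => PySem.Str.isIn q.2.1 did) (by exact h2), if_neg h2]
  by_cases h3 : PySem.Str.isIn "upgrade" did
  · rw [List.find?_cons_of_pos (p := fun q : Int × String × String => PySem.Str.isIn q.2.1 did) (by exact h3), if_pos h3]; rfl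
  rw [List.find?_cons_of_neg (p := fun q : Int × String × String => PySem.Str.isIn q.2.1 did) (by exact h3), if_neg h3]
  by_cases h4 : PySem.Str.isIn "operation" did
  · rw [List.find?_cons_of_pos (p := fun q : Int × String × String => PySem.Str.isIn q.2.1 did) (by exact h4), if_pos h4]; rfl
  rw [List.find?_cons_of_neg (p := fun q : Int × String × String => PySem.Str.isIn q.2.1 did) (by exact h4), if_neg h4]
  by_cases h5 : PySem.Str.isIn "installation" did
  · rw [List.find?_cons_of_pos (p := fun q : Int × String × String => PySem.Str.isIn q.2.1 did) (by exact h5), if_pos h5]; rfl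
  rw [List.find?_cons_of_neg (p := fun q : Int × String × String => PySem.Str.isIn q.2.1 did) (by exact h5), if_neg h5]
  by_cases h6 : PySem.Str.isIn "scope" did
  · rw [List.find?_cons_of_pos (p := fun q : Int × String × String => PySem.Str.isIn q.2.1 did) (by exact h6), if_pos (by rw [Bool.or_eq_true]; exact Or.inl h6)]; rfl
  rw [List.find?_cons_of_neg (p := fun q : Int × String × String => PySem.Str.isIn q.2.1 did) (by exact h6)]
  by_cases h7 : PySem.Str.isIn "feature" did
  · rw [List.find?_cons_of_pos (p := fun q : Int × String × String => PySem.Str.isIn q.2.1 did) (by exact h7), if_pos (by rw [Bool.or_eq_true]; exact Or.inr h7)]; rfl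
  rw [List.find?_cons_of_neg (p := fun q : Int × String × String => PySem.Str.isIn q.2.1 did) (by exact h7), if_neg (by rw [Bool.or_eq_true]; rintro (h | h); exact h6 h; exact h7 h)]
  by_cases h8 : PySem.Str.isIn "business" did
  · rw [List.find?_cons_of_pos (p := fun q : Int × String × String => PySem.Str.isIn q.2.1 did) (by exact h8), if_pos h8]; rfl
  rw [List.find?_cons_of_neg (p := fun q : Int × String × String => PySem.Str.isIn q.2.1 did) (by exact h8), if_neg h8]
  rfl

-- filtering the zip of docs with their mapped keys keeps exactly the docs with that key
theorem pvZipFilter (f : List (String × String) → String) (t : String) :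
    ∀ docs : List (List (String × String)),
      ((docs.zip (docs.map f)).filter (fun p => p.2 == t)).map (fun p => p.1)
        = docs.filter (fun d => f d == t)
  | [] => rfl
  | d :: ds => by
      by_cases h : f d == t <;>
        simp [List.filter, h, pvZipFilter f t ds]

set_option maxHeartbeats 1000000 in
-- ===== VERDICT (by name: the statement is the Claim_ definition above) =====
theorem group_docs_by_theme_py_spec : Claim_equal_group_docs_by_theme_py := by
  intro docs _ _
  unfold Spec_group_docs_by_theme_py group_docs_by_theme_py group_docs_by_theme_py_alt
  have hfun : (fun (groups : PySem.Dict String (List (List (String × String)))) (doc : List (String × String)) =>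
      let doc_id := PySem.Str.lower ((PySem.Dict.mk doc).getD "doc_id" "")
      let theme :=
        if PySem.Str.isIn "security" doc_id then "security"
        else if PySem.Str.isIn "conversion" doc_id then "conversion"
        else if PySem.Str.isIn "upgrade" doc_id then "upgrade"
        else if PySem.Str.isIn "operation" doc_id then "operations"
        else if PySem.Str.isIn "installation" doc_id then "installation"
        else if PySem.Str.isIn "scope" doc_id || PySem.Str.isIn "feature" doc_id then "feature_scope"
        else if PySem.Str.isIn "business" doc_id then "business_scope"
        else "other"
      groups.modify theme [] (fun x => x ++ [doc]))
    = (fun groups doc => groups.modify (pvKeyOf doc) [] (fun x => x ++ [doc])) := by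
    funext groups doc
    simp only [pvKeyOf, pvTheme_eq]
  rw [hfun]
  have hkeys : (docs.foldl (fun (groups : PySem.Dict String (List (List (String × String)))) doc =>
      groups.modify (pvKeyOf doc) [] (fun x => x ++ [doc])) PySem.Dict.empty).keys
      = PySem.Set.ofList (docs.map pvKeyOf) := by
    rw [PySem.Dict.keys_foldl_modify_key docs pvKeyOf [] (fun _ doc v => v ++ [doc]) PySem.Dict.empty]
    rw [PySem.Dict.keys_empty, PySem.Set.update_nil_left]
  have hnodup : (docs.foldl (fun (groups : PySem.Dict String (List (List (String × String)))) doc =>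
      groups.modify (pvKeyOf doc) [] (fun x => x ++ [doc])) PySem.Dict.empty).keys.Nodup := by
    rw [hkeys]; exact PySem.Set.nodup_ofList _
  have hgetD : ∀ t, (docs.foldl (fun (groups : PySem.Dict String (List (List (String × String)))) doc =>
      groups.modify (pvKeyOf doc) [] (fun x => x ++ [doc])) PySem.Dict.empty).getD t []
      = docs.filter (fun d => pvKeyOf d == t) := by
    intro t
    have h := PySem.Dict.getD_foldl_modify_append
      (docs.map (fun d => (pvKeyOf d, d))) PySem.Dict.empty t
    rw [List.foldl_map] at h
    rw [h]
    rw [List.filter_map, List.map_map]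
    simp [Function.comp_def]
  rw [PySem.Dict.items_eq_map_keys _ hnodup []]
  rw [hkeys]
  rw [← PySem.List.dedup_eq_ofList]
  simp only [pvKeyOf]
  apply List.map_congr_left
  intro t _
  rw [pvZipFilter]
  congr 1
  have h2 := hgetD t
  simp only [pvKeyOf] at h2
  exact h2
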